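-- pv_equiv track=rewrite | github.com/dagster-io/dagster | python_modules/automation/automation/dagster_docs/docstring_rules/section_header_rule.py | _is_inside_code_block
-- ===== SOURCE A (Python) =====
-- def _is_inside_code_block(lines: list[str], current_line_index: int) -> bool:
--     """Check if the current line is inside a code block.
--
--     Detects RST code blocks like:
--     - .. code-block:: python
--     - .. code-block:: yaml
--     - :: (literal blocks)
--     - Lines indented after code block directives
--     """
--     # Search backwards from current line to find if we're in a code block
--     in_code_block = False
--     code_block_indent = None
--
--     for i in range(current_line_index):
--         line = lines[i]
--         stripped = line.strip()
--         leading_spaces = len(line) - len(line.lstrip())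
--
--         # Check for code block directives
--         if stripped.startswith(".. code-block::") or (
--             stripped.endswith("::") and not stripped.startswith(":")
--         ):
--             in_code_block = True
--             code_block_indent = leading_spaces
--             continue
--
--         # If we found a code block, check if current line is still part of it
--         if in_code_block:
--             # Empty lines don't break code blocks
--             if not stripped:
--                 continue
--
--             # If this line has less or equal indentation than the code block directive,
--             # we've exited the code block
--             if code_block_indent is not None and leading_spaces <= code_block_indent:
--                 in_code_block = False
--                 code_block_indent = None
--
--     return in_code_block
-- ===== SOURCE B (Python) =====
-- def _is_inside_code_block(lines: list[str], current_line_index: int) -> bool: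
--     """Backward scan: find the nearest preceding directive and compare its indent
--     with the minimum indent of the non-empty lines between it and the current line."""
--     min_indent = None  # None means "no non-empty line seen yet" (infinity)
--     for i in range(current_line_index - 1, -1, -1):
--         line = lines[i]
--         stripped = line.strip()
--         leading_spaces = len(line) - len(line.lstrip())
--         if stripped.startswith(".. code-block::") or (
--             stripped.endswith("::") and not stripped.startswith(":")
--         ):
--             return min_indent is None or min_indent > leading_spaces
--         if stripped:
--             min_indent = leading_spaces if min_indent is None else min(min_indent, leading_spaces)
--     return False
-- ===== Notes on version B (the rewrite author's own statement) =====
-- stated objective: alternative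
-- what changed: Replaces A's forward scan with (in_code_block, code_block_indent) state by a backward scan that stops at the nearest preceding directive, maintaining only the minimum indent of non-empty lines seen on the way; B can return early, A always walks the whole prefix.
import Mathlib
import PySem

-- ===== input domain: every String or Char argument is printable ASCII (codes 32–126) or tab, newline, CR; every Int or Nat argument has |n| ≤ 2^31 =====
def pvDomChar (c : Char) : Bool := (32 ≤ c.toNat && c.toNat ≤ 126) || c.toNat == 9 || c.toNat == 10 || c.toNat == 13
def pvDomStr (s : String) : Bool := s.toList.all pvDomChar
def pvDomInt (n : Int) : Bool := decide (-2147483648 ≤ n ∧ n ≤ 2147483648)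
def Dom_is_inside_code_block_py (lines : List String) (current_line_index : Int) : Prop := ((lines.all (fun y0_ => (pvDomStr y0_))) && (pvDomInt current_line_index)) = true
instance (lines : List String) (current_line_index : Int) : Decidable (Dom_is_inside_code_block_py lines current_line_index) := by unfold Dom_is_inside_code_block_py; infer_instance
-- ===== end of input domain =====

-- B replaces A's forward stateful scan by a backward scan that stops at the nearest
-- preceding directive, comparing its indent with the min indent seen on the way (alternative decomposition, same cost).

-- is a stripped line a code-block directive?
def pvIsDirective (stripped : String) : Bool :=
  PySem.Str.startswith stripped ".. code-block::" ||
    (PySem.Str.endswith stripped "::" && !PySem.Str.startswith stripped ":")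

-- leading whitespace count: len(line) - len(line.lstrip())
def pvLeading (line : String) : Int :=
  PySem.Str.len line - PySem.Str.len (PySem.Str.lstrip line)

-- ===== PORT A =====
-- one iteration of A's forward loop; state = (in_code_block, code_block_indent)
def pvStepA (lines : List String) (st : Bool × Option Int) (i : Int) : Bool × Option Int :=
  if pvIsDirective (PySem.Str.strip (PySem.List.pyGetD lines i "")) then
    (true, some (pvLeading (PySem.List.pyGetD lines i "")))
  else if st.1 then
    if PySem.Str.strip (PySem.List.pyGetD lines i "") = "" then st
    else match st.2 with
      | some d =>
          if pvLeading (PySem.List.pyGetD lines i "") ≤ d then ((false : Bool), (none : Option Int))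
          else st
      | none => st
  else st

def is_inside_code_block_py (lines : List String) (current_line_index : Int) : Bool :=
  ((PySem.List.pyRange 0 current_line_index 1).foldl (pvStepA lines) (false, none)).1

-- ===== PORT B =====
-- backward loop of Source B: n = number of indices still to visit (next index is n-1);
-- minIndent none = "no non-empty line seen yet"
def pvAltGo (lines : List String) : Nat → Option Int → Bool
  | 0, _ => false
  | Nat.succ n, minIndent =>
    if pvIsDirective (PySem.Str.strip (PySem.List.pyGetD lines (n : Int) "")) then
      match minIndent with
      | none => true
      | some m => decide (pvLeading (PySem.List.pyGetD lines (n : Int) "") < m)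
    else
      pvAltGo lines n
        (if PySem.Str.strip (PySem.List.pyGetD lines (n : Int) "") = "" then minIndent
         else some (match minIndent with
                    | none => pvLeading (PySem.List.pyGetD lines (n : Int) "")
                    | some m => min m (pvLeading (PySem.List.pyGetD lines (n : Int) ""))))

def is_inside_code_block_py_alt (lines : List String) (current_line_index : Int) : Bool :=
  pvAltGo lines current_line_index.toNat none

-- ===== PRECONDITION & SPEC =====
-- Pre_ excludes exactly the inputs where A raises IndexError: current_line_index > len(lines).
def Pre_is_inside_code_block_py (lines : List String) (current_line_index : Int) : Prop :=
  current_line_index ≤ (lines.length : Int)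
instance (lines : List String) (current_line_index : Int) : Decidable (Pre_is_inside_code_block_py lines current_line_index) := by unfold Pre_is_inside_code_block_py; infer_instance

def pvWitness_is_inside_code_block_py : List String × Int :=
  ([".. code-block:: python", "", "    x = 1"], 3)

def Spec_is_inside_code_block_py (lines : List String) (current_line_index : Int) (out : Bool) : Prop := out = is_inside_code_block_py_alt lines current_line_index
instance (lines : List String) (current_line_index : Int) (out : Bool) : Decidable (Spec_is_inside_code_block_py lines current_line_index out) := by unfold Spec_is_inside_code_block_py; infer_instance

-- ===== CLAIM (what is proved, stated in full; the proofs are below) =====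
def Claim_equal_is_inside_code_block_py : Prop := ∀ (lines : List String) (current_line_index : Int), Dom_is_inside_code_block_py lines current_line_index → Pre_is_inside_code_block_py lines current_line_index → Spec_is_inside_code_block_py lines current_line_index (is_inside_code_block_py lines current_line_index)

-- ===== LEMMAS AND PROOFS =====

-- what B's backward scan returns, read off A's forward state together with B's accumulator
def pvOut (st : Bool × Option Int) (acc : Option Int) : Bool :=
  st.1 && (match st.2, acc with
           | some d, some m => decide (d < m)
           | _, _ => true)

theorem pvStep_out (lines : List String) (n : Nat) (st : Bool × Option Int)
    (ih : ∀ acc, pvAltGo lines n acc = pvOut st acc) (acc : Option Int) :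
    pvAltGo lines (n + 1) acc = pvOut (pvStepA lines st (n : Int)) acc := by
  obtain ⟨b, d⟩ := st
  simp only [pvAltGo, pvStepA]
  generalize PySem.Str.strip (PySem.List.pyGetD lines (n : Int) "") = stripped
  generalize pvLeading (PySem.List.pyGetD lines (n : Int) "") = L
  by_cases hdir : pvIsDirective stripped = true
  · simp only [hdir, if_true, pvOut]
    cases acc <;> simp
  · simp only [hdir, if_false, Bool.false_eq_true]
    by_cases hempty : stripped = ""
    · simp only [hempty, if_true]
      rw [ih acc]
      cases b <;> simp [pvOut]
    · simp only [hempty, if_false]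
      rw [ih]
      cases b with
      | false => simp [pvOut]
      | true =>
        cases d with
        | none => cases acc <;> simp [pvOut]
        | some dv =>
          by_cases hle : L ≤ dv
          · simp only [hle, if_true]
            cases acc with
            | none => simp [pvOut]; omega
            | some m => simp [pvOut]; omega
          · simp only [hle, if_false]
            cases acc with
            | none => simp [pvOut]; omega
            | some m => simp [pvOut]; omega

theorem pvMain (lines : List String) (n : Nat) :
    ∀ acc, pvAltGo lines n acc =
      pvOut (((PySem.List.pyRange 0 (n : Int) 1).foldl (pvStepA lines) (false, none))) acc := by
  induction n with
  | zero =>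
    intro acc
    simp [pvAltGo, PySem.List.pyRange_one_eq_nil (le_refl (0 : Int)), pvOut]
  | succ n ih =>
    intro acc
    rw [show ((n + 1 : Nat) : Int) = (n : Int) + 1 by push_cast; ring,
        PySem.List.pyRange_one_succ_right (by positivity), List.foldl_append, List.foldl_cons,
        List.foldl_nil]
    exact pvStep_out lines n _ ih acc

-- ===== VERDICT (by name: the statement is the Claim_ definition above) =====
theorem is_inside_code_block_py_spec : Claim_equal_is_inside_code_block_py := by
  intro lines idx _ _
  unfold Spec_is_inside_code_block_py is_inside_code_block_py is_inside_code_block_py_alt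
  by_cases h : 0 ≤ idx
  · lift idx to ℕ using h with n
    rw [show ((n : Int)).toNat = n from Int.toNat_natCast n, pvMain lines n none]
    simp [pvOut]
  · rw [PySem.List.pyRange_one_eq_nil (by omega), Int.toNat_of_nonpos (by omega)]
    simp [pvAltGo]
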